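-- pv_equiv track=rewrite | github.com/ATPs/xiaolongTools | WenlinTools.Python3/scripts/barcode_scripts/step7_threading_good_reads.py | suffix_index
-- ===== SOURCE A (Python) =====
-- def suffix_index(seq):
--     isStart = False
--     for i, char in enumerate(seq):
--         if isStart:
--             if char == '-' or char.islower():
--                 break
--
--         if char == '-':
--             continue
--         if char.isupper():
--             isStart = True
--     return i
-- ===== SOURCE B (Python) =====
-- def suffix_index(seq):
--     # Single right-to-left pass with two registers:
--     #   ft = index of the first '-'/lowercase char in the suffix seen so far
--     #   a  = index of the first '-'/lowercase char strictly after the first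
--     #        uppercase char of the suffix seen so far (None if none)
--     # At an uppercase char the answer for the current suffix becomes ft.
--     ft = None
--     a = None
--     for i in range(len(seq) - 1, -1, -1):
--         c = seq[i]
--         if c.isupper():
--             a = ft
--         elif c == '-' or c.islower():
--             ft = i
--     return a if a is not None else len(seq) - 1
-- ===== Notes on version B (the rewrite author's own statement) =====
-- stated objective: alternative
-- what changed: Replaces A's forward scan with a stateful isStart flag by a single right-to-left pass maintaining two registers (first terminator index of the suffix seen so far, and the answer for that suffix), updating the answer to the current first-terminator whenever an uppercase character is met.
import Mathlib
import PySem

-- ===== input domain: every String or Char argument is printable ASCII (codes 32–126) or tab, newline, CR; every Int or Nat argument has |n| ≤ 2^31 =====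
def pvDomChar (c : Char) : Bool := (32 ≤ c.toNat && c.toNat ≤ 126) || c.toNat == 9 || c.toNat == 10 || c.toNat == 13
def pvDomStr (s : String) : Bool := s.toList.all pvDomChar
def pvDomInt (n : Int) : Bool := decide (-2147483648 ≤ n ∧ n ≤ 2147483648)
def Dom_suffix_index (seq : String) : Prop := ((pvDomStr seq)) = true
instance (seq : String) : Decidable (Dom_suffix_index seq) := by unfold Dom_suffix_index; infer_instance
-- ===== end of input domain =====

-- B replaces A's forward flag-driven scan by a single RIGHT-to-left pass keeping two
-- registers (first terminator of the suffix; the answer for the suffix); same O(n) cost.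

-- ===== PORT A =====
-- the for-loop over enumerate(seq) with state (isStart, current i); `last` is the loop
-- variable i from the previous iteration (returned when the list is exhausted)
def suffixIndexGo : List Char → Nat → Bool → Int → Int
  | [], _, _, last => last
  | c :: rest, i, isStart, _ =>
    if isStart && (c == '-' || PySem.Chars.islower c) then (i : Int)
    else if c == '-' then suffixIndexGo rest (i + 1) isStart (i : Int)
    else if PySem.Chars.isupper c then suffixIndexGo rest (i + 1) true (i : Int)
    else suffixIndexGo rest (i + 1) isStart (i : Int)

def suffix_index (seq : String) : Int := suffixIndexGo seq.toList 0 false (-1)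

-- ===== PORT B =====
-- Source B's descending loop `for i in range(len(seq)-1, -1, -1)` over (index, char) pairs,
-- rendered as a right fold over the enumeration: foldr visits the rightmost pair first.
def altEnumFrom : Nat → List Char → List (Nat × Char)
  | _, [] => []
  | j, c :: r => (j, c) :: altEnumFrom (j + 1) r

def altStep (p : Nat × Char) (st : Option Nat × Option Nat) : Option Nat × Option Nat :=
  let (i, c) := p
  let (ft, a) := st
  if PySem.Chars.isupper c then (ft, ft)
  else if c == '-' || PySem.Chars.islower c then (some i, a)
  else (ft, a)

def suffix_index_alt (seq : String) : Int :=
  let cs := seq.toList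
  let st := (altEnumFrom 0 cs).foldr altStep (none, none)
  match st.2 with
  | some j => (j : Int)
  | none => (cs.length : Int) - 1

-- ===== PRECONDITION & SPEC =====
-- Pre_ excludes only the empty string, on which Python A raises UnboundLocalError (the loop never binds i).
def Pre_suffix_index (seq : String) : Prop := seq.toList ≠ []
instance (seq : String) : Decidable (Pre_suffix_index seq) := by unfold Pre_suffix_index; infer_instance
def pvWitness_suffix_index : String := "Ab"

def Spec_suffix_index (seq : String) (out : Int) : Prop := out = suffix_index_alt seq
instance (seq : String) (out : Int) : Decidable (Spec_suffix_index seq out) := by unfold Spec_suffix_index; infer_instance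

-- ===== CLAIM (what is proved, stated in full; the proofs are below) =====
def Claim_equal_suffix_index : Prop := ∀ (seq : String), Dom_suffix_index seq → Pre_suffix_index seq → Spec_suffix_index seq (suffix_index seq)

-- ===== LEMMAS AND PROOFS =====

-- specification helpers: first terminator index in the suffix starting at j,
-- and first terminator strictly after the first uppercase char of that suffix
def ftOf : Nat → List Char → Option Nat
  | _, [] => none
  | j, c :: r => if c == '-' || PySem.Chars.islower c then some j else ftOf (j + 1) r

def aOf : Nat → List Char → Option Nat
  | _, [] => none
  | j, c :: r => if PySem.Chars.isupper c then ftOf (j + 1) r else aOf (j + 1) r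

theorem upper_not_term (c : Char) (h : PySem.Chars.isupper c = true) :
    (c == '-' || PySem.Chars.islower c) = false := by
  simp only [PySem.Chars.isupper, Bool.and_eq_true, decide_eq_true_eq] at h
  obtain ⟨h1, h2⟩ := h
  simp only [Bool.or_eq_false_iff, beq_eq_false_iff_ne, ne_eq]
  constructor
  · intro hc; subst hc; revert h1; decide
  · simp only [PySem.Chars.islower, Bool.and_eq_false_iff, decide_eq_false_iff_not, not_le]
    left
    exact lt_of_le_of_lt h2 (by decide)

-- A's loop once isStart is true: returns the first terminator index, else last index
theorem go_true_eq : ∀ (cs : List Char) (j : Nat),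
    suffixIndexGo cs j true ((j : Int) - 1) =
      (match ftOf j cs with
       | some t => (t : Int)
       | none => ((j + cs.length : Nat) : Int) - 1) := by
  intro cs
  induction cs with
  | nil => intro j; simp [suffixIndexGo, ftOf]
  | cons c rest ih =>
    intro j
    simp only [suffixIndexGo, ftOf, Bool.true_and]
    by_cases hterm : (c == '-' || PySem.Chars.islower c) = true
    · simp [hterm]
    · rw [Bool.not_eq_true] at hterm
      have hcast : ((j + 1 : Nat) : Int) - 1 = (j : Int) := by push_cast; ring
      have hrec := ih (j + 1)
      rw [hcast] at hrec
      have hlen : j + 1 + rest.length = j + (rest.length + 1) := by omega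
      simp only [hterm, Bool.false_eq_true, if_false, List.length_cons]
      split
      · next h' => rw [h'] at hterm; simp at hterm
      · split <;> rw [hrec, hlen]

-- A's loop while isStart is false computes `aOf` (falling back to the last index)
theorem go_false_eq : ∀ (cs : List Char) (j : Nat),
    suffixIndexGo cs j false ((j : Int) - 1) =
      (match aOf j cs with
       | some t => (t : Int)
       | none => ((j + cs.length : Nat) : Int) - 1) := by
  intro cs
  induction cs with
  | nil => intro j; simp [suffixIndexGo, aOf]
  | cons c rest ih =>
    intro j
    have hcast : ((j + 1 : Nat) : Int) - 1 = (j : Int) := by push_cast; ring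
    have hlen : j + 1 + rest.length = j + (rest.length + 1) := by omega
    by_cases hup : PySem.Chars.isupper c = true
    · have hnd : (c == '-') = false := by
        have := upper_not_term c hup
        cases h' : (c == '-') <;> simp [h'] at this ⊢
      simp only [suffixIndexGo, aOf, Bool.false_and, Bool.false_eq_true, if_false, hnd, hup,
        if_true, List.length_cons]
      have := go_true_eq rest (j + 1)
      rw [hcast] at this
      rw [this, hlen]
    · rw [Bool.not_eq_true] at hup
      simp only [suffixIndexGo, aOf, Bool.false_and, Bool.false_eq_true, if_false, hup,
        List.length_cons]
      have hrec := ih (j + 1)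
      rw [hcast] at hrec
      cases h' : (c == '-') <;> simp only [Bool.false_eq_true, if_false, if_true] <;>
        rw [hrec, hlen]

-- B's right fold computes exactly the pair (ftOf, aOf)
theorem foldr_eq : ∀ (cs : List Char) (j : Nat),
    (altEnumFrom j cs).foldr altStep (none, none) = (ftOf j cs, aOf j cs) := by
  intro cs
  induction cs with
  | nil => intro j; simp [altEnumFrom, ftOf, aOf]
  | cons c rest ih =>
    intro j
    simp only [altEnumFrom, List.foldr_cons, ih (j + 1), altStep, ftOf, aOf]
    by_cases hup : PySem.Chars.isupper c = true
    · simp [hup, upper_not_term c hup]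
    · rw [Bool.not_eq_true] at hup
      by_cases ht : (c == '-' || PySem.Chars.islower c) = true
      · simp [hup, ht]
      · rw [Bool.not_eq_true] at ht
        simp [hup, ht]

-- ===== VERDICT (by name: the statement is the Claim_ definition above) =====
theorem suffix_index_spec : Claim_equal_suffix_index := by
  intro seq _ _
  unfold Spec_suffix_index suffix_index suffix_index_alt
  have hA := go_false_eq seq.toList 0
  simp only [Nat.cast_zero, zero_sub, Nat.zero_add] at hA
  rw [hA]
  simp only [foldr_eq]
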